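-- pv_equiv track=rewrite | github.com/TimOgden/YTClipEditor | youtubeclip.py | fitting_timeintervals
-- ===== SOURCE A (Python) =====
-- def fitting_timeintervals(ti,start_range=None,end_range=None):
-- 	if start_range is not None and end_range is not None:
-- 		return [t for t in ti
-- 				if t[0]>=start_range[0] and t[0]<=start_range[1]
-- 				and t[1]>=end_range[0] and t[1]<=end_range[1]]
-- 	elif start_range is not None:
-- 		return [t for t in ti
-- 				if t[0]>=start_range[0] and t[0]<=start_range[1]]
-- 	elif start_range is None and end_range is None:
-- 		return None
-- 	else:
-- 		return [t for t in ti
-- 				if t[1]>=end_range[0] and t[1]<=end_range[1]]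
-- ===== SOURCE B (Python) =====
-- def fitting_timeintervals(ti, start_range=None, end_range=None):
--     if start_range is None and end_range is None:
--         return None
--     return _stage(_stage(ti, 0, start_range), 1, end_range)
--
-- def _stage(lst, field, rng):
--     if rng is None:
--         return lst
--     lo, hi = rng
--     out = []
--     for t in lst:
--         if lo <= t[field] <= hi:
--             out.append(t)
--     return out
-- ===== Notes on version B (the rewrite author's own statement) =====
-- stated objective: simpler
-- what changed: Replaces A's 2x2 branch enumeration with duplicated comprehensions by a staged pipeline: a single generic one-field range filter applied twice in sequence (start pass, then end pass over the intermediate list), with None only when both ranges are absent.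
import Mathlib
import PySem

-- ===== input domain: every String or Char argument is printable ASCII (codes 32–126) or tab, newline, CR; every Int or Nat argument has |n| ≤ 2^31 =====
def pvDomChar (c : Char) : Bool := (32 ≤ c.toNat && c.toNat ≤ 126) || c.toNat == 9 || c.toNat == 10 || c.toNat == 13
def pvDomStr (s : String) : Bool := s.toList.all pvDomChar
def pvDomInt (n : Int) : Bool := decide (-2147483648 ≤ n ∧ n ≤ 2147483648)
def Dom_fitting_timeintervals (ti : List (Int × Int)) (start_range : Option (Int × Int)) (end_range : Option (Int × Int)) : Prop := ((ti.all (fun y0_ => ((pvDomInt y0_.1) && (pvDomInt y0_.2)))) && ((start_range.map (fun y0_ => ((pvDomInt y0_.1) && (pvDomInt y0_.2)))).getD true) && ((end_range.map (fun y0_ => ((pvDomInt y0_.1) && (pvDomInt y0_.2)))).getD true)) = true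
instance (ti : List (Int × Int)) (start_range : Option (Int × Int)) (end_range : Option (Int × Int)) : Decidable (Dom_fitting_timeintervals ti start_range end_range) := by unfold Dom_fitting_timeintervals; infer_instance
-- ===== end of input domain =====

-- B replaces A's 2x2 branch enumeration by a staged pipeline: one generic
-- single-field range filter applied twice in sequence (simpler decomposition).

-- ===== PORT A =====
def fitting_timeintervals (ti : List (Int × Int)) (start_range : Option (Int × Int)) (end_range : Option (Int × Int)) : Option (List (Int × Int)) :=
  match start_range, end_range with
  | some sr, some er =>
      some (ti.filter (fun t => decide (t.1 ≥ sr.1) && decide (t.1 ≤ sr.2)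
            && decide (t.2 ≥ er.1) && decide (t.2 ≤ er.2)))
  | some sr, none =>
      some (ti.filter (fun t => decide (t.1 ≥ sr.1) && decide (t.1 ≤ sr.2)))
  | none, none => none
  | none, some er =>
      some (ti.filter (fun t => decide (t.2 ≥ er.1) && decide (t.2 ≤ er.2)))

-- ===== PORT B =====
-- t[field] with field ∈ {0,1} is ported as a match on the Nat field index (exact here).
def pvStage (lst : List (Int × Int)) (field : Nat) (rng : Option (Int × Int)) : List (Int × Int) :=
  match rng with
  | none => lst
  | some (lo, hi) =>
      lst.foldl (fun out t =>
        if lo ≤ (if field = 0 then t.1 else t.2) ∧ (if field = 0 then t.1 else t.2) ≤ hi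
        then out ++ [t] else out) []

def fitting_timeintervals_alt (ti : List (Int × Int)) (start_range : Option (Int × Int)) (end_range : Option (Int × Int)) : Option (List (Int × Int)) :=
  match start_range, end_range with
  | none, none => none
  | _, _ => some (pvStage (pvStage ti 0 start_range) 1 end_range)

-- ===== PRECONDITION & SPEC =====
def Spec_fitting_timeintervals (ti : List (Int × Int)) (start_range : Option (Int × Int)) (end_range : Option (Int × Int)) (out : Option (List (Int × Int))) : Prop := out = fitting_timeintervals_alt ti start_range end_range
instance (ti : List (Int × Int)) (start_range : Option (Int × Int)) (end_range : Option (Int × Int)) (out : Option (List (Int × Int))) : Decidable (Spec_fitting_timeintervals ti start_range end_range out) := by unfold Spec_fitting_timeintervals; infer_instance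

-- ===== CLAIM =====
def Claim_equal_fitting_timeintervals : Prop := ∀ (ti : List (Int × Int)) (start_range : Option (Int × Int)) (end_range : Option (Int × Int)), Dom_fitting_timeintervals ti start_range end_range → Spec_fitting_timeintervals ti start_range end_range (fitting_timeintervals ti start_range end_range)

-- ===== LEMMAS AND PROOFS =====
theorem pvStage_eq_filter (lst : List (Int × Int)) (field : Nat) (lo hi : Int) :
    pvStage lst field (some (lo, hi)) =
      lst.filter (fun t => decide (lo ≤ (if field = 0 then t.1 else t.2)) &&
        decide ((if field = 0 then t.1 else t.2) ≤ hi)) := by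
  unfold pvStage
  suffices h : ∀ acc : List (Int × Int),
      lst.foldl (fun out t =>
        if lo ≤ (if field = 0 then t.1 else t.2) ∧ (if field = 0 then t.1 else t.2) ≤ hi
        then out ++ [t] else out) acc =
      acc ++ lst.filter (fun t => decide (lo ≤ (if field = 0 then t.1 else t.2)) &&
        decide ((if field = 0 then t.1 else t.2) ≤ hi)) by
    simpa using h []
  induction lst with
  | nil => simp
  | cons x xs ih =>
    intro acc
    simp only [List.foldl_cons, List.filter_cons]
    by_cases hx : lo ≤ (if field = 0 then x.1 else x.2) ∧ (if field = 0 then x.1 else x.2) ≤ hi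
    · simp [hx, ih, decide_eq_true_eq, hx.1, hx.2]
    · have : (decide (lo ≤ (if field = 0 then x.1 else x.2)) &&
        decide ((if field = 0 then x.1 else x.2) ≤ hi)) = false := by
        rcases not_and_or.mp hx with h | h <;> simp [h]
      simp [hx, ih, this]

-- ===== VERDICT =====
theorem fitting_timeintervals_spec : Claim_equal_fitting_timeintervals := by
  intro ti sr er _
  unfold Spec_fitting_timeintervals fitting_timeintervals fitting_timeintervals_alt
  cases sr with
  | none => cases er with
    | none => rfl
    | some er =>
      obtain ⟨lo, hi⟩ := er
      rw [show pvStage ti 0 none = ti from rfl, pvStage_eq_filter]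
      refine congrArg some (List.filter_congr fun t _ => ?_)
      simp
  | some sr => cases er with
    | none =>
      obtain ⟨lo, hi⟩ := sr
      rw [show ∀ l, pvStage l 1 none = l from fun _ => rfl, pvStage_eq_filter]
      refine congrArg some (List.filter_congr fun t _ => ?_)
      simp
    | some er =>
      obtain ⟨lo, hi⟩ := sr
      obtain ⟨lo', hi'⟩ := er
      rw [pvStage_eq_filter, pvStage_eq_filter, List.filter_filter]
      refine congrArg some (List.filter_congr fun t _ => ?_)
      simp only [ge_iff_le, Bool.and_assoc]
      conv_rhs => rw [Bool.and_comm]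
      simp [Bool.and_assoc, Bool.and_left_comm, Bool.and_comm]
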